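-- pv_equiv track=rewrite | github.com/vvatsaraj09/Meta_Coding_Puzzles | Level 2/Rotary_Lock_2.py | getMinCodeEntryTime
-- ===== SOURCE A (Python) =====
-- from typing import List
--
-- def getVal(a, curr, N):
--   return min(abs(curr-a), N-max(curr, a)+min(a,curr))
--
-- def getMinCodeEntryTime(N: int, M: int, C: List[int]) -> int:
--   C.insert(0,1)
--   M+=1
--   ans = [[float('inf') for _ in range(i)] for i in range(M)]
--   ans[1][0] = getVal(C[0], C[1], N)
--   for i in range(2,M):
--       for j in range(i-1):
--           ans[i][j] = getVal(C[i-1], C[i], N)+ans[i-1][j]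
--       for j in range(i-1):
--           ans[i][i-1] = min(ans[i][i-1], ans[i-1][j]+getVal(C[j], C[i], N))
--   return min(ans[-1])
-- ===== SOURCE B (Python) =====
-- def getMinCodeEntryTime(N, M, C):
--     # DP over "idle dial position" computed with two functional min-segment-trees
--     # over the sorted set of dial positions (additively-weighted nearest-point
--     # queries |p-c| split at c into prefix/suffix minima of rel-p and rel+p),
--     # plus two running scalars for the farthest-point (N-|p-c|) part.
--     def dist(a, b):
--         return min(abs(b - a), N - max(a, b) + min(a, b))
--
--     def mino(x, y):
--         if x is None:
--             return y
--         if y is None: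
--             return x
--         return min(x, y)
--
--     def build(n):
--         if n <= 1:
--             return ("leaf", None)
--         h = n // 2
--         return ("node", None, h, build(h), build(n - h))
--
--     def tval(t):
--         return t[1]
--
--     def chmin(t, i, v):
--         if t[0] == "leaf":
--             return ("leaf", mino(t[1], v))
--         _, _, h, l, r = t
--         if i < h:
--             l = chmin(l, i, v)
--         else:
--             r = chmin(r, i - h, v)
--         return ("node", mino(tval(l), tval(r)), h, l, r)
--
--     def query(t, k):  # min over the first k leaves
--         if k <= 0:
--             return None
--         if t[0] == "leaf":
--             return t[1]
--         _, _, h, l, r = t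
--         if k <= h:
--             return query(l, k)
--         return mino(tval(l), query(r, k - h))
--
--     pos = [1] + C[:M]
--     coords = sorted(set(pos))
--     rank = {p: i for i, p in enumerate(coords)}
--     L = len(coords)
--     t1 = build(L)          # stores rel - p, leaves in ascending coordinate order
--     t2 = build(L)          # stores rel + p, leaves in descending coordinate order
--     mx = None              # max of p - rel
--     mn = None              # min of p + rel
--     rels = []
--     prev = 1
--     off = 0
--     for i in range(M):
--         c = C[i]
--         d = dist(prev, c)
--         if i == 0:
--             rel = 0
--         else:
--             k = rank[c]
--             q1 = query(t1, k + 1)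
--             q2 = query(t2, L - k)
--             a1 = mino(None if q1 is None else q1 + c,
--                       None if q2 is None else q2 - c)
--             a2 = N - max(mx - c, c - mn)
--             rel = mino(a1, a2) - d
--         r = rank[prev]
--         t1 = chmin(t1, r, rel - prev)
--         t2 = chmin(t2, L - 1 - r, rel + prev)
--         mx = prev - rel if mx is None else max(mx, prev - rel)
--         mn = prev + rel if mn is None else min(mn, prev + rel)
--         rels.append(rel)
--         off += d
--         prev = c
--     return min(rels) + off
-- ===== Notes on version B (the rewrite author's own statement) =====
-- stated objective: faster
-- what changed: Replaces A's O(M^2) triangular-table DP (an inner scan over all previous codes at every step) by the same-valued DP whose inner minimum is answered in O(log M): two functional min-segment-trees over the sorted set of dial positions give the additively-weighted nearest-point part min(rel + |p-c|) as prefix/suffix minima of rel-p and rel+p, and two running scalars give the wrap-around part min(rel + N - |p-c|), with per-code relative costs under a lazy global offset.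
import Mathlib
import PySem

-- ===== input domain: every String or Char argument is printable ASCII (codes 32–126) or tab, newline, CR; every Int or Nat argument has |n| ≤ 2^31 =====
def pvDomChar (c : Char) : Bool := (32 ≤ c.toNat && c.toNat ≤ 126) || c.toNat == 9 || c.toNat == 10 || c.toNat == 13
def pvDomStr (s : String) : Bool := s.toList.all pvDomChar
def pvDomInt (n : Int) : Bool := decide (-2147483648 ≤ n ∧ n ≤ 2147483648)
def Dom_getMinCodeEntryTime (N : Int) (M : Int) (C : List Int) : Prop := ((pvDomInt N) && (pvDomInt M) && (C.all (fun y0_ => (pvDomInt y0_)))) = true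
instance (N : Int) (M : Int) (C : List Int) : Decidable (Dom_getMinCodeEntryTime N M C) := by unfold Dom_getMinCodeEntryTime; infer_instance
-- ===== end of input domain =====

-- B replaces A's O(M^2) triangular table DP (inner scan over all previous codes at
-- every step) by the same-valued DP answered with two functional min-segment-trees
-- over the sorted set of dial positions plus two running scalars (O(M log M)).
-- Python A mutates its argument C (C.insert(0,1)); the equivalence is about the return value only.

-- ===== PORT A =====
def getVal (a : Int) (curr : Int) (N : Int) : Int :=
  min (abs (curr - a)) (N - max curr a + min a curr)

-- a float('inf') table cell is encoded as `none`; finite cells are exact ints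
def pvAddO (x : Option Int) (y : Int) : Option Int := x.map (fun v => v + y)

def pvMinO (x y : Option Int) : Option Int :=
  match x, y with
  | none, y => y
  | some a, none => some a
  | some a, some b => some (min a b)

-- C[i] (both ports): the default is read only on an IndexError input, which Pre_ excludes
def pvIdxA (xs : List Int) (i : Int) : Int := (PySem.List.pyGet? xs i).getD 0

def pvGet2 (t : List (List (Option Int))) (i j : Int) : Option Int :=
  match PySem.List.pyGet? t i with
  | none => none            -- IndexError: unreachable, loop indices stay in range
  | some r =>
    match PySem.List.pyGet? r j with
    | none => none
    | some v => v

-- table writes; only nonnegative loop indices reach it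
def pvSet2 (t : List (List (Option Int))) (i j : Int) (v : Option Int) : List (List (Option Int)) :=
  t.modify i.toNat (fun r => r.set j.toNat v)

-- first inner loop body:  ans[i][j] = getVal(C[i-1], C[i], N) + ans[i-1][j]
def pvInner1A (N : Int) (Cp : List Int) (i : Int) (ans : List (List (Option Int))) (j : Int) : List (List (Option Int)) :=
  pvSet2 ans i j (pvAddO (pvGet2 ans (i-1) j) (getVal (pvIdxA Cp (i-1)) (pvIdxA Cp i) N))

-- second inner loop body:  ans[i][i-1] = min(ans[i][i-1], ans[i-1][j] + getVal(C[j], C[i], N))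
def pvInner2A (N : Int) (Cp : List Int) (i : Int) (ans : List (List (Option Int))) (j : Int) : List (List (Option Int)) :=
  pvSet2 ans i (i-1) (pvMinO (pvGet2 ans i (i-1)) (pvAddO (pvGet2 ans (i-1) j) (getVal (pvIdxA Cp j) (pvIdxA Cp i) N)))

-- body of the outer `for i in range(2, M)` loop
def pvStepA (N : Int) (Cp : List Int) (ans : List (List (Option Int))) (i : Int) : List (List (Option Int)) :=
  (PySem.List.pyRange 0 (i-1) 1).foldl (pvInner2A N Cp i)
    ((PySem.List.pyRange 0 (i-1) 1).foldl (pvInner1A N Cp i) ans)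

def getMinCodeEntryTime (N : Int) (M : Int) (C : List Int) : Int :=
  let C := 1 :: C
  let M := M + 1
  let ans : List (List (Option Int)) :=
    (PySem.List.pyRange 0 M 1).map (fun i => (PySem.List.pyRange 0 i 1).map (fun _ => (none : Option Int)))
  let ans := pvSet2 ans 1 0 (some (getVal (pvIdxA C 0) (pvIdxA C 1) N))
  let ans := (PySem.List.pyRange 2 M 1).foldl (pvStepA N C) ans
  -- min(ans[-1]); the empty row (ValueError) and a leftover inf occur only outside Pre_
  (((PySem.List.pyGet? ans (-1)).getD []).foldl pvMinO none).getD 0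

-- ===== PORT B =====
def pvDist (N : Int) (a : Int) (b : Int) : Int :=
  min (abs (b - a)) (N - max a b + min a b)

-- Python min over a nonempty sequence (head, then fold)
def pvMinL (x : Int) (xs : List Int) : Int := xs.foldl min x

-- min(seq); [] (Python: ValueError) only reachable outside Pre_
def pvMinNE (l : List Int) : Int :=
  match l with
  | [] => 0
  | x :: xs => pvMinL x xs

-- functional min-segment-tree: Source B's ("leaf", v) / ("node", v, h, l, r) tuples
inductive SegT
  | leaf : Option Int → SegT
  | node : Option Int → Nat → SegT → SegT → SegT
deriving DecidableEq, Repr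

def pvTval : SegT → Option Int
  | .leaf v => v
  | .node v _ _ _ => v

def pvBuild (n : Nat) : SegT :=
  if n ≤ 1 then .leaf none
  else .node none (n / 2) (pvBuild (n / 2)) (pvBuild (n - n / 2))
termination_by n
decreasing_by all_goals omega

def pvChmin : SegT → Int → Int → SegT
  | .leaf v, _, w => .leaf (pvMinO v (some w))
  | .node _ h l r, i, w =>
    if i < (h : Int) then
      let l' := pvChmin l i w
      .node (pvMinO (pvTval l') (pvTval r)) h l' r
    else
      let r' := pvChmin r (i - (h : Int)) w
      .node (pvMinO (pvTval l) (pvTval r')) h l r'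

def pvQuery (t : SegT) (k : Int) : Option Int :=
  if k ≤ 0 then none
  else
    match t with
    | .leaf v => v
    | .node _ h l r => if k ≤ (h : Int) then pvQuery l k else pvMinO (pvTval l) (pvQuery r (k - (h : Int)))

-- Source B's loop state
structure BSt where
  t1 : SegT
  t2 : SegT
  mx : Option Int
  mn : Option Int
  rels : List Int
  prev : Int
  off : Int
deriving DecidableEq, Repr

-- loop body of Source B; the `.getD 0` defaults are only read on inputs outside Pre_
def pvStepB (N : Int) (C : List Int) (rank : PySem.Dict Int Int) (L : Int) (s : BSt) (i : Int) : BSt :=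
  let c := pvIdxA C i
  let d := pvDist N s.prev c
  let rel :=
    if i = 0 then 0
    else
      let k := (rank.get? c).getD 0          -- rank[c]; KeyError unreachable under Pre_
      let q1 := pvQuery s.t1 (k + 1)
      let q2 := pvQuery s.t2 (L - k)
      let a1 := pvMinO (q1.map (· + c)) (q2.map (· - c))
      let a2 := N - max ((s.mx.getD 0) - c) (c - (s.mn.getD 0))   -- mx/mn are ints after step 0
      (pvMinO a1 (some a2)).getD 0 - d
  let r := (rank.get? s.prev).getD 0
  { t1 := pvChmin s.t1 r (rel - s.prev)
    t2 := pvChmin s.t2 (L - 1 - r) (rel + s.prev)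
    mx := match s.mx with | none => some (s.prev - rel) | some m => some (max m (s.prev - rel))
    mn := match s.mn with | none => some (s.prev + rel) | some m => some (min m (s.prev + rel))
    rels := s.rels ++ [rel]
    prev := c
    off := s.off + d }

def getMinCodeEntryTime_alt (N : Int) (M : Int) (C : List Int) : Int :=
  let pos := 1 :: PySem.List.slice C none (some M)
  let coords := PySem.List.sorted (PySem.Set.ofList pos) (fun x => x) false
  let rank : PySem.Dict Int Int :=
    (PySem.List.enumerate coords 0).foldl (fun d pr => d.insert pr.2 pr.1) PySem.Dict.empty
  let st := (PySem.List.pyRange 0 M 1).foldl (pvStepB N C rank (coords.length : Int))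
    ⟨pvBuild coords.length, pvBuild coords.length, none, none, [], 1, 0⟩
  pvMinNE st.rels + st.off

-- ===== PRECONDITION & SPEC =====
-- Pre_ excludes exactly the inputs where Python A raises an IndexError:
-- M ≤ 0 (on ans[1][0]) and M > len(C) (on C[i]).
def Pre_getMinCodeEntryTime (N : Int) (M : Int) (C : List Int) : Prop :=
  1 ≤ M ∧ M ≤ (C.length : Int)
instance (N : Int) (M : Int) (C : List Int) : Decidable (Pre_getMinCodeEntryTime N M C) := by
  unfold Pre_getMinCodeEntryTime; infer_instance

def pvWitness_getMinCodeEntryTime : Int × Int × List Int := (10, 2, [3, 5])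

def Spec_getMinCodeEntryTime (N : Int) (M : Int) (C : List Int) (out : Int) : Prop := out = getMinCodeEntryTime_alt N M C
instance (N : Int) (M : Int) (C : List Int) (out : Int) : Decidable (Spec_getMinCodeEntryTime N M C out) := by unfold Spec_getMinCodeEntryTime; infer_instance

-- ===== CLAIM (what is proved, stated in full; the proofs are below) =====
def Claim_equal_getMinCodeEntryTime : Prop := ∀ (N : Int) (M : Int) (C : List Int), Dom_getMinCodeEntryTime N M C → Pre_getMinCodeEntryTime N M C → Spec_getMinCodeEntryTime N M C (getMinCodeEntryTime N M C)

-- ===== LEMMAS AND PROOFS =====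

-- reference objects (proof-only): C'[j], the row of costs after j codes, the lazy offset, the pair list
def pvCC (C : List Int) (j : Nat) : Int := (1 :: C).getD j 0

def pvRow (N : Int) (C : List Int) : Nat → List Int
  | 0 => []
  | 1 => [pvDist N 1 (pvCC C 1)]
  | (k+2) =>
      (pvRow N C (k+1)).map (fun v => v + pvDist N (pvCC C (k+1)) (pvCC C (k+2))) ++
        [pvMinNE ((List.range (k+1)).map
          (fun j => (pvRow N C (k+1)).getD j 0 + pvDist N (pvCC C j) (pvCC C (k+2))))]

def pvOff (N : Int) (C : List Int) : Nat → Int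
  | 0 => 0
  | (k+1) => pvOff N C k + pvDist N (pvCC C k) (pvCC C (k+1))

def pvPairsR (N : Int) (C : List Int) (k : Nat) : List (Int × Int) :=
  (List.range k).map (fun j => (pvCC C j, (pvRow N C k).getD j 0 - pvOff N C k))

def pvTbl (N : Int) (C : List Int) (K k : Nat) : List (List (Option Int)) :=
  (List.range (K+1)).map (fun i => if 1 ≤ i ∧ i ≤ k then (pvRow N C i).map some else List.replicate i none)

-- basic facts
theorem pvCC_zero (C : List Int) : pvCC C 0 = 1 := rfl

theorem getVal_eq_pvDist (a b N : Int) : getVal a b N = pvDist N a b := by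
  simp [getVal, pvDist, max_comm]

theorem pvIdxA_eq_pvCC (C : List Int) (n : Nat) : pvIdxA (1 :: C) (n : Int) = pvCC C n := by
  simp [pvIdxA, pvCC, PySem.List.pyGet?_natCast, List.getD_eq_getElem?_getD]

theorem pvIdx_shift_eq_pvCC (C : List Int) (n : Nat) : pvIdxA C (n : Int) = pvCC C (n + 1) := by
  simp [pvIdxA, pvCC, PySem.List.pyGet?_natCast, List.getD_eq_getElem?_getD]

theorem pvRow_length (N : Int) (C : List Int) : (k : Nat) → (pvRow N C k).length = k
  | 0 => by simp [pvRow]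
  | 1 => by simp [pvRow]
  | (k+2) => by simp [pvRow, pvRow_length N C (k+1)]

theorem pvMinL_shift (x t : Int) (xs : List Int) :
    pvMinL (x + t) (xs.map (fun v => v + t)) = pvMinL x xs + t := by
  induction xs generalizing x with
  | nil => simp [pvMinL]
  | cons y ys ih =>
    simp only [pvMinL, List.map_cons, List.foldl_cons] at *
    rw [min_add_add_right, ih]

theorem pvMinNE_shift (t : Int) (l : List Int) (h : l ≠ []) :
    pvMinNE (l.map (fun v => v + t)) = pvMinNE l + t := by
  cases l with
  | nil => exact absurd rfl h
  | cons x xs => simp only [pvMinNE, List.map_cons]; exact pvMinL_shift x t xs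

theorem foldl_pvMinO_some (x : Int) (xs : List Int) :
    (xs.map some).foldl pvMinO (some x) = some (pvMinL x xs) := by
  induction xs generalizing x with
  | nil => simp [pvMinL]
  | cons y ys ih => simp only [List.map_cons, List.foldl_cons, pvMinO, pvMinL] at *; rw [ih]

theorem foldl_pvMinO_none (l : List Int) (h : l ≠ []) :
    (l.map some).foldl pvMinO none = some (pvMinNE l) := by
  cases l with
  | nil => exact absurd rfl h
  | cons x xs =>
    simp only [List.map_cons, List.foldl_cons, pvMinNE]
    show (xs.map some).foldl pvMinO (some x) = _
    exact foldl_pvMinO_some x xs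

theorem map_getD_range (l : List Int) :
    (List.range l.length).map (fun j => l.getD j 0) = l := by
  apply List.ext_getElem (by simp)
  intro i h1 h2
  simp [List.getD_eq_getElem?_getD, List.getElem?_eq_getElem h2]

-- row stability: old entries grow by exactly the new transition cost
theorem pvRow_getElem_stable (N : Int) (C : List Int) (k j : Nat) (hk : 1 ≤ k) (hj : j < k) :
    (pvRow N C (k+1)).getD j 0 = (pvRow N C k).getD j 0 + pvDist N (pvCC C k) (pvCC C (k+1)) := by
  obtain ⟨k, rfl⟩ : ∃ k', k = k' + 1 := ⟨k - 1, by omega⟩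
  have hlen : j < ((pvRow N C (k+1)).map
      (fun v => v + pvDist N (pvCC C (k+1)) (pvCC C (k+2)))).length := by
    simp [pvRow_length]; omega
  have hlen2 : j < (pvRow N C (k+1)).length := by rw [pvRow_length]; omega
  show (pvRow N C (k+2)).getD j 0 = _
  simp only [pvRow]
  rw [List.getD_append _ _ _ _ hlen, List.getD_eq_getElem _ _ hlen, List.getElem_map,
    List.getD_eq_getElem _ _ hlen2]

theorem pairs_step (N : Int) (C : List Int) (k : Nat) (hk : 1 ≤ k) :
    pvPairsR N C k ++ [(pvCC C k,
      pvMinNE ((pvPairsR N C k).map (fun pr => pr.2 + pvDist N pr.1 (pvCC C (k+1))))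
        - pvDist N (pvCC C k) (pvCC C (k+1)))]
    = pvPairsR N C (k+1) := by
  have hmap : (pvPairsR N C k).map (fun pr => pr.2 + pvDist N pr.1 (pvCC C (k+1)))
      = ((List.range k).map (fun j => (pvRow N C k).getD j 0 + pvDist N (pvCC C j) (pvCC C (k+1)))).map
          (fun v => v + (- pvOff N C k)) := by
    simp only [pvPairsR, List.map_map]
    apply List.map_congr_left
    intro j _
    simp only [Function.comp]
    ring
  have hne : (List.range k).map (fun j => (pvRow N C k).getD j 0 + pvDist N (pvCC C j) (pvCC C (k+1))) ≠ [] := by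
    simp [List.range_eq_nil]; omega
  conv_rhs => rw [pvPairsR, List.range_succ, List.map_append]
  congr 1
  · apply List.map_congr_left
    intro j hj
    rw [List.mem_range] at hj
    have := pvRow_getElem_stable N C k j hk hj
    simp only [this, pvOff, Prod.mk.injEq]
    exact ⟨trivial, by ring⟩
  · simp only [List.map_cons, List.map_nil, hmap, pvMinNE_shift _ _ hne]
    obtain ⟨k', rfl⟩ : ∃ k', k = k' + 1 := ⟨k - 1, by omega⟩
    have hlast : (pvRow N C (k'+2)).getD (k'+1) 0
        = pvMinNE ((List.range (k'+1)).map
            (fun j => (pvRow N C (k'+1)).getD j 0 + pvDist N (pvCC C j) (pvCC C (k'+2)))) := by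
      simp only [pvRow]
      rw [List.getD_append_right _ _ _ _ (by simp [pvRow_length])]
      simp [pvRow_length]
    rw [hlast]
    simp only [pvOff, List.cons.injEq, Prod.mk.injEq, and_true]
    exact ⟨trivial, by ring⟩

-- ===== Option-min toolkit =====
theorem pvMinO_none_right (x : Option Int) : pvMinO x none = x := by cases x <;> rfl

theorem pvMinO_assoc (a b c : Option Int) : pvMinO (pvMinO a b) c = pvMinO a (pvMinO b c) := by
  cases a <;> cases b <;> cases c <;> simp [pvMinO, min_assoc]

theorem pvMinO_comm (a b : Option Int) : pvMinO a b = pvMinO b a := by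
  cases a <;> cases b <;> simp [pvMinO, min_comm]

def pvOmin (l : List (Option Int)) : Option Int := l.foldl pvMinO none

theorem foldl_pvMinO_eq (l : List (Option Int)) (a : Option Int) :
    l.foldl pvMinO a = pvMinO a (pvOmin l) := by
  induction l generalizing a with
  | nil => simp [pvOmin, pvMinO_none_right]
  | cons x xs ih =>
    show (xs.foldl pvMinO (pvMinO a x)) = pvMinO a (pvOmin (x :: xs))
    rw [ih]
    have hx : pvOmin (x :: xs) = pvMinO x (pvOmin xs) := by
      show xs.foldl pvMinO (pvMinO none x) = _
      rw [ih]
      rfl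
    rw [hx, pvMinO_assoc]

theorem pvOmin_cons (x : Option Int) (xs : List (Option Int)) :
    pvOmin (x :: xs) = pvMinO x (pvOmin xs) := by
  show xs.foldl pvMinO (pvMinO none x) = _
  rw [foldl_pvMinO_eq]
  rfl

theorem pvOmin_append (xs ys : List (Option Int)) :
    pvOmin (xs ++ ys) = pvMinO (pvOmin xs) (pvOmin ys) := by
  simp only [pvOmin, List.foldl_append]
  rw [foldl_pvMinO_eq ys (xs.foldl pvMinO none)]
  rfl

theorem pvOmin_perm {l l' : List (Option Int)} (h : l.Perm l') : pvOmin l = pvOmin l' := by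
  induction h with
  | nil => rfl
  | cons x _ ih => rw [pvOmin_cons, pvOmin_cons, ih]
  | swap x y l =>
    rw [pvOmin_cons, pvOmin_cons, pvOmin_cons, pvOmin_cons, ← pvMinO_assoc,
      ← pvMinO_assoc, pvMinO_comm x y]
  | trans _ _ ih1 ih2 => rw [ih1, ih2]

def pvOminI (l : List Int) : Option Int := pvOmin (l.map some)

theorem pvOminI_eq (l : List Int) (h : l ≠ []) : pvOminI l = some (pvMinNE l) :=
  foldl_pvMinO_none l h

theorem pvOminI_nil : pvOminI [] = none := rfl

theorem pvOminI_append (xs ys : List Int) :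
    pvOminI (xs ++ ys) = pvMinO (pvOminI xs) (pvOminI ys) := by
  simp only [pvOminI, List.map_append, pvOmin_append]

theorem pvOminI_perm {l l' : List Int} (h : l.Perm l') : pvOminI l = pvOminI l' :=
  pvOmin_perm (h.map some)

-- bounds for pvMinNE / pvMaxNE
theorem pvMinNE_le {l : List Int} {y : Int} (h : y ∈ l) : pvMinNE l ≤ y := by
  cases l with
  | nil => cases h
  | cons x xs =>
    rcases List.mem_cons.mp h with rfl | hy
    · exact (PySem.List.foldl_min_le xs y).1
    · exact (PySem.List.foldl_min_le xs x).2 y hy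

theorem pvMinNE_mem {l : List Int} (h : l ≠ []) : pvMinNE l ∈ l := by
  cases l with
  | nil => exact absurd rfl h
  | cons x xs =>
    show xs.foldl min x ∈ x :: xs
    rcases PySem.List.foldl_min_mem xs x with h' | h'
    · rw [h']; exact List.mem_cons_self ..
    · exact List.mem_cons_of_mem x h'

def pvMaxNE (l : List Int) : Int :=
  match l with
  | [] => 0
  | x :: xs => xs.foldl max x

theorem pvMaxNE_ge {l : List Int} {y : Int} (h : y ∈ l) : y ≤ pvMaxNE l := by
  cases l with
  | nil => cases h
  | cons x xs =>
    rcases List.mem_cons.mp h with rfl | hy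
    · exact (PySem.List.le_foldl_max xs y).1
    · exact (PySem.List.le_foldl_max xs x).2 y hy

theorem pvMaxNE_mem {l : List Int} (h : l ≠ []) : pvMaxNE l ∈ l := by
  cases l with
  | nil => exact absurd rfl h
  | cons x xs =>
    show xs.foldl max x ∈ x :: xs
    rcases PySem.List.foldl_max_mem xs x with h' | h'
    · rw [h']; exact List.mem_cons_self ..
    · exact List.mem_cons_of_mem x h'

-- ===== segment tree correctness =====
def svLeaves : SegT → List (Option Int)
  | .leaf v => [v]
  | .node _ _ l r => svLeaves l ++ svLeaves r

def svWf : SegT → Prop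
  | .leaf _ => True
  | .node v h l r => v = pvMinO (pvTval l) (pvTval r) ∧ h = (svLeaves l).length ∧ svWf l ∧ svWf r

theorem svTval_eq : (t : SegT) → svWf t → pvTval t = pvOmin (svLeaves t)
  | .leaf v, _ => by simp [pvTval, svLeaves, pvOmin, pvMinO]
  | .node v h l r, hw => by
    obtain ⟨hv, hh, hl, hr⟩ := hw
    show v = pvOmin (svLeaves l ++ svLeaves r)
    rw [pvOmin_append, hv, svTval_eq l hl, svTval_eq r hr]

theorem svLeaves_build (n : Nat) : svLeaves (pvBuild n) = List.replicate (max n 1) none := by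
  induction n using Nat.strong_induction_on with
  | _ n ih =>
    rw [pvBuild]
    by_cases h : n ≤ 1
    · rw [if_pos h]
      interval_cases n <;> rfl
    · rw [if_neg h]
      simp only [svLeaves, ih (n / 2) (by omega), ih (n - n / 2) (by omega)]
      rw [show max (n/2) 1 = n/2 by omega, show max (n - n/2) 1 = n - n/2 by omega,
        ← List.replicate_add]
      congr 1
      omega

theorem svWf_build (n : Nat) : svWf (pvBuild n) := by
  induction n using Nat.strong_induction_on with
  | _ n ih =>
    rw [pvBuild]
    by_cases h : n ≤ 1
    · rw [if_pos h]; trivial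
    · rw [if_neg h]
      refine ⟨?_, ?_, ih (n / 2) (by omega), ih (n - n / 2) (by omega)⟩
      · have h1 := svTval_eq _ (ih (n / 2) (by omega))
        have h2 := svTval_eq _ (ih (n - n / 2) (by omega))
        rw [h1, h2, svLeaves_build, svLeaves_build]
        have : ∀ m : Nat, pvOmin (List.replicate m none) = none := by
          intro m; induction m with
          | zero => rfl
          | succ m ihm => simpa [pvOmin, List.replicate_succ] using ihm
        simp [this, pvMinO]
      · rw [svLeaves_build, List.length_replicate]
        omega

theorem svChmin_spec : (t : SegT) → svWf t → (i : Int) → 0 ≤ i → i.toNat < (svLeaves t).length →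
    (w : Int) →
    svLeaves (pvChmin t i w)
      = (svLeaves t).set i.toNat (pvMinO ((svLeaves t).getD i.toNat none) (some w))
    ∧ svWf (pvChmin t i w)
  | .leaf v, _, i, h0, hlt, w => by
    have : i.toNat = 0 := by simp [svLeaves] at hlt; omega
    simp [pvChmin, svLeaves, svWf, this]
  | .node v h l r, hw, i, h0, hlt, w => by
    obtain ⟨hv, hh, hl, hr⟩ := hw
    simp only [svLeaves, List.length_append] at hlt
    by_cases hcase : i < (h : Int)
    · have hi : i.toNat < (svLeaves l).length := by omega
      obtain ⟨hL, hW⟩ := svChmin_spec l hl i h0 hi w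
      rw [pvChmin, if_pos hcase]
      constructor
      · show svLeaves (pvChmin l i w) ++ svLeaves r
            = (svLeaves l ++ svLeaves r).set i.toNat
                (pvMinO ((svLeaves l ++ svLeaves r).getD i.toNat none) (some w))
        rw [hL, List.set_append, if_pos hi, List.getD_append _ _ _ _ hi]
      · exact ⟨rfl, by rw [hL, List.length_set]; exact hh, hW, hr⟩
    · have hge : (h : Int) ≤ i := by omega
      have h0' : 0 ≤ i - (h : Int) := by omega
      have htn : (i - (h : Int)).toNat = i.toNat - h := by omega
      have hi : (i - (h : Int)).toNat < (svLeaves r).length := by omega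
      obtain ⟨hR, hW⟩ := svChmin_spec r hr (i - (h : Int)) h0' hi w
      rw [pvChmin, if_neg hcase]
      constructor
      · show svLeaves l ++ svLeaves (pvChmin r (i - (h : Int)) w)
            = (svLeaves l ++ svLeaves r).set i.toNat
                (pvMinO ((svLeaves l ++ svLeaves r).getD i.toNat none) (some w))
        rw [hR, List.set_append, if_neg (by omega), List.getD_append_right _ _ _ _ (by omega),
          htn, hh]
      · exact ⟨rfl, hh, hl, hW⟩

theorem svQuery_eq : (t : SegT) → svWf t → (k : Int) →
    pvQuery t k = pvOmin ((svLeaves t).take k.toNat)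
  | .leaf v, _, k => by
    by_cases hk : k ≤ 0
    · rw [pvQuery, if_pos hk, show k.toNat = 0 by omega]
      rfl
    · rw [pvQuery, if_neg hk]
      show v = pvOmin ([v].take k.toNat)
      rw [show [v].take k.toNat = [v] by rw [List.take_of_length_le]; simp; omega]
      cases v <;> rfl
  | .node v h l r, hw, k => by
    obtain ⟨hv, hh, hl, hr⟩ := hw
    by_cases hk : k ≤ 0
    · rw [pvQuery, if_pos hk, show k.toNat = 0 by omega]
      rfl
    · rw [pvQuery, if_neg hk]
      show _ = pvOmin ((svLeaves l ++ svLeaves r).take k.toNat)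
      rw [List.take_append]
      by_cases hc : k ≤ (h : Int)
      · rw [if_pos hc, svQuery_eq l hl k,
          show k.toNat - (svLeaves l).length = 0 by omega, List.take_zero,
          List.append_nil]
      · rw [if_neg hc, svQuery_eq r hr (k - (h : Int)), svTval_eq l hl,
          show (svLeaves l).take k.toNat = svLeaves l from
            List.take_of_length_le (by omega),
          show (k - (h : Int)).toNat = k.toNat - (svLeaves l).length by omega,
          pvOmin_append]

-- ===== per-coordinate cells =====
def pvCell (P : List (Int × Int)) (f : Int × Int → Int) (q : Int) : Option Int :=
  pvOminI ((P.filter (fun pr => pr.1 == q)).map f)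

def pvLspec (coords : List Int) (P : List (Int × Int)) (f : Int × Int → Int) : List (Option Int) :=
  coords.map (pvCell P f)

theorem pvLspec_nil (coords : List Int) (f : Int × Int → Int) :
    pvLspec coords [] f = List.replicate coords.length none := by
  have h : pvCell [] f = fun _ => (none : Option Int) := rfl
  simp [pvLspec, h, List.map_const']

theorem pvLspec_getD (coords : List Int) (P : List (Int × Int)) (f : Int × Int → Int)
    (j : Nat) (hj : j < coords.length) :
    (pvLspec coords P f).getD j none = pvCell P f coords[j] := by
  rw [pvLspec, List.getD_eq_getElem?_getD, List.getElem?_map, List.getElem?_eq_getElem hj]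
  rfl

theorem pvLspec_snoc (coords : List Int) (hnd : coords.Nodup) (P : List (Int × Int))
    (f : Int × Int → Int) (p rel : Int) (j : Nat) (hj : j < coords.length) (hp : coords[j] = p) :
    pvLspec coords (P ++ [(p, rel)]) f
      = (pvLspec coords P f).set j (pvMinO ((pvLspec coords P f).getD j none) (some (f (p, rel)))) := by
  apply List.ext_getElem
  · simp [pvLspec]
  intro i h1 h2
  have hi : i < coords.length := by simpa [pvLspec] using h1
  rw [List.getElem_set]
  simp only [pvLspec, List.getElem_map]
  by_cases he : j = i
  · subst he
    have hg := pvLspec_getD coords P f j hj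
    simp only [pvLspec] at hg
    rw [if_pos rfl, hg, pvCell, pvCell, List.filter_append,
      List.map_append, pvOminI_append]
    congr 1
    rw [show ([(p, rel)].filter (fun pr => pr.1 == coords[j])) = [(p, rel)] by
      simp [hp]]
    rfl
  · rw [if_neg he, pvCell, pvCell, List.filter_append,
      show ([(p, rel)].filter (fun pr => pr.1 == coords[i])) = [] by
        have : coords[i] ≠ p := by
          rw [← hp]
          intro hc
          exact he ((List.Nodup.getElem_inj_iff hnd).mp hc).symm
        simp [this.symm]]
    rw [List.append_nil]

theorem pvLspec_single (coords : List Int) (hnd : coords.Nodup) (f : Int × Int → Int)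
    (p rel : Int) (j : Nat) (hj : j < coords.length) (hp : coords[j] = p) :
    pvLspec coords [(p, rel)] f
      = (List.replicate coords.length none).set j (some (f (p, rel))) := by
  have h := pvLspec_snoc coords hnd [] f p rel j hj hp
  rw [List.nil_append] at h
  rw [h, pvLspec_nil, List.getD_eq_getElem?_getD, List.getElem?_replicate, if_pos hj]
  rfl

theorem filter_or_perm (P : List (Int × Int)) (p q : Int × Int → Bool)
    (hdisj : ∀ x, p x = true → q x = true → False) :
    (P.filter p ++ P.filter q).Perm (P.filter (fun x => p x || q x)) := by
  induction P with
  | nil => simp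
  | cons x t ih =>
    by_cases hp : p x = true
    · have hq : q x = false := by
        cases hqv : q x
        · rfl
        · exact absurd (hdisj x hp hqv) (fun h => h)
      simp only [List.filter_cons, hp, hq, Bool.true_or, if_true, Bool.false_eq_true,
        if_false, List.cons_append]
      exact ih.cons x
    · have hp' : p x = false := by cases hpv : p x; rfl; exact absurd hpv hp
      by_cases hq : q x = true
      · simp only [List.filter_cons, hp', hq, Bool.or_true, if_true,
          Bool.false_eq_true, if_false]
        exact (List.perm_middle).trans (ih.cons x)
      · have hq' : q x = false := by cases hqv : q x; rfl; exact absurd hqv hq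
        simp only [List.filter_cons, hp', hq', Bool.or_self, Bool.false_eq_true, if_false]
        exact ih

theorem pvOmin_map_cell (D : List Int) (hnd : D.Nodup) (P : List (Int × Int)) (f : Int × Int → Int) :
    pvOmin (D.map (pvCell P f)) = pvOminI ((P.filter (fun pr => decide (pr.1 ∈ D))).map f) := by
  induction D with
  | nil =>
    rw [show P.filter (fun pr => decide (pr.1 ∈ ([] : List Int))) = [] by simp]
    rfl
  | cons d D ih =>
    obtain ⟨hd, hD⟩ := List.nodup_cons.mp hnd
    have hdisj : ∀ x : Int × Int, (x.1 == d) = true → decide (x.1 ∈ D) = true → False := by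
      intro x h1 h2
      rw [beq_iff_eq] at h1
      rw [decide_eq_true_eq] at h2
      exact hd (h1 ▸ h2)
    rw [List.map_cons, pvOmin_cons, ih hD]
    show pvMinO (pvOminI ((P.filter (fun pr => pr.1 == d)).map f)) _ = _
    rw [← pvOminI_append, ← List.map_append,
      pvOminI_perm ((filter_or_perm P _ _ hdisj).map f)]
    congr 2
    apply List.filter_congr
    intro a _
    simp [List.mem_cons, beq_eq_decide]

-- ===== rank dictionary =====
theorem dict_foldl_get_not_mem (l : List Int) (s : Int) (d0 : PySem.Dict Int Int) (x : Int)
    (hx : x ∉ l) :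
    ((PySem.List.enumerate l s).foldl (fun d pr => d.insert pr.2 pr.1) d0).get? x = d0.get? x := by
  induction l generalizing s d0 with
  | nil => rfl
  | cons y t ih =>
    rw [PySem.List.enumerate_cons, List.foldl_cons,
      ih (s+1) _ (fun h => hx (List.mem_cons_of_mem _ h))]
    exact PySem.Dict.get?_insert_of_ne _ _ (fun h => hx (h ▸ List.mem_cons_self ..))

theorem dict_foldl_get (l : List Int) (hnd : l.Nodup) (s : Int) (d0 : PySem.Dict Int Int)
    (j : Nat) (hj : j < l.length) :
    ((PySem.List.enumerate l s).foldl (fun d pr => d.insert pr.2 pr.1) d0).get? l[j]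
      = some (s + j) := by
  induction l generalizing s d0 j with
  | nil => simp at hj
  | cons y t ih =>
    obtain ⟨hy, ht⟩ := List.nodup_cons.mp hnd
    rw [PySem.List.enumerate_cons, List.foldl_cons]
    cases j with
    | zero =>
      show _ = some (s + (0:Nat))
      rw [List.getElem_cons_zero, dict_foldl_get_not_mem t (s+1) _ y hy,
        PySem.Dict.get?_insert_self]
      norm_num
    | succ j =>
      rw [List.getElem_cons_succ, ih ht (s+1) (d0.insert y s) j (by simpa using hj)]
      congr 1
      push_cast
      ring

theorem rank_get (coords : List Int) (hnd : coords.Nodup) (j : Nat) (hj : j < coords.length) :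
    (((PySem.List.enumerate coords 0).foldl (fun d pr => d.insert pr.2 pr.1)
        PySem.Dict.empty).get? coords[j]) = some (j : Int) := by
  rw [dict_foldl_get coords hnd 0 PySem.Dict.empty j hj]
  norm_num

-- sorted prefix/suffix membership
theorem mem_take_sorted {coords : List Int} (hs : coords.Pairwise (· < ·)) {j : Nat}
    (hj : j < coords.length) {x : Int} :
    x ∈ coords.take (j+1) ↔ x ∈ coords ∧ x ≤ coords[j] := by
  have hget := List.pairwise_iff_getElem.mp hs
  constructor
  · intro hx
    obtain ⟨i, hi, hxi⟩ := List.mem_iff_getElem.mp hx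
    rw [List.length_take] at hi
    rw [List.getElem_take] at hxi
    refine ⟨hxi ▸ List.getElem_mem _, ?_⟩
    rcases Nat.lt_or_ge i j with h' | h'
    · exact hxi ▸ le_of_lt (hget i j (by omega) hj h')
    · have : i = j := by omega
      subst this
      exact hxi ▸ le_rfl
  · rintro ⟨hx, hle⟩
    obtain ⟨i, hi, hxi⟩ := List.mem_iff_getElem.mp hx
    have hij : i ≤ j := by
      by_contra h'
      exact absurd (hxi ▸ hget j i hj hi (by omega)) (by omega)
    exact List.mem_iff_getElem.mpr ⟨i, by rw [List.length_take]; omega,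
      by rw [List.getElem_take]; exact hxi⟩

theorem mem_drop_sorted {coords : List Int} (hs : coords.Pairwise (· < ·)) {j : Nat}
    (hj : j < coords.length) {x : Int} :
    x ∈ coords.drop j ↔ x ∈ coords ∧ coords[j] ≤ x := by
  have hget := List.pairwise_iff_getElem.mp hs
  constructor
  · intro hx
    obtain ⟨i, hi, hxi⟩ := List.mem_iff_getElem.mp hx
    rw [List.length_drop] at hi
    rw [List.getElem_drop] at hxi
    refine ⟨hxi ▸ List.getElem_mem _, ?_⟩
    rcases Nat.eq_zero_or_pos i with h' | h'
    · subst h'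
      simpa using hxi ▸ le_rfl
    · exact hxi ▸ le_of_lt (hget j (j+i) hj (by omega) (by omega))
  · rintro ⟨hx, hle⟩
    obtain ⟨i, hi, hxi⟩ := List.mem_iff_getElem.mp hx
    have hij : j ≤ i := by
      by_contra h'
      exact absurd (hxi ▸ hget i j hi hj (by omega)) (by omega)
    have he : coords[j + (i - j)]'(by omega) = coords[i] := by congr 1; omega
    exact List.mem_iff_getElem.mpr ⟨i - j, by rw [List.length_drop]; omega,
      by rw [List.getElem_drop]; rw [he]; exact hxi⟩

-- ===== the reconciliation of B's three-part query with the brute-force minimum =====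
theorem step_min (N c : Int) (P : List (Int × Int)) (hne : P ≠ []) :
    (pvMinO
        (pvMinO
          ((pvOminI ((P.filter (fun pr => decide (pr.1 ≤ c))).map (fun pr => pr.2 - pr.1))).map (· + c))
          ((pvOminI ((P.filter (fun pr => decide (c ≤ pr.1))).map (fun pr => pr.2 + pr.1))).map (· - c)))
        (some (N - max (pvMaxNE (P.map (fun pr => pr.1 - pr.2)) - c)
                        (c - pvMinNE (P.map (fun pr => pr.1 + pr.2)))))).getD 0
    = pvMinNE (P.map (fun pr => pr.2 + pvDist N pr.1 c)) := by
  have hmapne : ∀ (g : Int × Int → Int), P.map g ≠ [] := fun g h => hne (List.map_eq_nil_iff.mp h)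
  set F := fun pr : Int × Int => pr.2 + pvDist N pr.1 c with hF
  set L := pvMinNE (P.map F) with hLdef
  set S1 := (P.filter (fun pr => decide (pr.1 ≤ c))).map (fun pr => pr.2 - pr.1) with hS1
  set S2 := (P.filter (fun pr => decide (c ≤ pr.1))).map (fun pr => pr.2 + pr.1) with hS2
  set mx := pvMaxNE (P.map (fun pr => pr.1 - pr.2)) with hmxdef
  set mn := pvMinNE (P.map (fun pr => pr.1 + pr.2)) with hmndef
  set a2 := N - max (mx - c) (c - mn) with ha2
  have hLle : ∀ pr ∈ P, L ≤ F pr := fun pr h => pvMinNE_le (List.mem_map_of_mem h)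
  obtain ⟨prL, hprLP, hprLF⟩ := List.mem_map.mp (pvMinNE_mem (hmapne F))
  rw [← hLdef] at hprLF
  obtain ⟨pr1, hpr1P, hpr1⟩ := List.mem_map.mp (pvMaxNE_mem (hmapne (fun pr => pr.1 - pr.2)))
  obtain ⟨pr2, hpr2P, hpr2⟩ := List.mem_map.mp (pvMinNE_mem (hmapne (fun pr => pr.1 + pr.2)))
  have hmxge : ∀ pr ∈ P, pr.1 - pr.2 ≤ mx := fun pr h => pvMaxNE_ge (List.mem_map_of_mem h)
  have hmnle : ∀ pr ∈ P, mn ≤ pr.1 + pr.2 := fun pr h => pvMinNE_le (List.mem_map_of_mem h)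
  have hdist_abs : ∀ p : Int, pvDist N p c ≤ |c - p| := fun p => min_le_left _ _
  have hdist_wrap : ∀ p : Int, pvDist N p c ≤ N - max p c + min p c := fun p => min_le_right _ _
  -- lower bounds for the three candidates
  rw [← hmxdef] at hpr1
  rw [← hmndef] at hpr2
  have hLa2 : L ≤ a2 := by
    rcases max_choice (mx - c) (c - mn) with h | h
    · have h1 := hLle pr1 hpr1P
      have h3 := hdist_wrap pr1.1
      simp only [hF] at h1
      rw [ha2, h]
      omega
    · have h1 := hLle pr2 hpr2P
      have h3 := hdist_wrap pr2.1
      simp only [hF] at h1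
      rw [ha2, h]
      omega
  have hq1ge : ∀ v1, pvOminI S1 = some v1 → L ≤ v1 + c := by
    intro v1 hv
    have hSne : S1 ≠ [] := by
      intro h
      rw [h, pvOminI_nil] at hv
      simp at hv
    rw [pvOminI_eq _ hSne] at hv
    obtain ⟨pr, hprS, hpreq⟩ := List.mem_map.mp (pvMinNE_mem hSne)
    rw [← hS1] at hpreq
    have hprP := List.mem_of_mem_filter hprS
    have hprle : pr.1 ≤ c := by simpa using List.of_mem_filter hprS
    have hLF := hLle pr hprP
    have hd := hdist_abs pr.1
    rw [abs_of_nonneg (by omega)] at hd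
    simp only [hF] at hLF
    have hv' := Option.some.inj hv
    omega
  have hq2ge : ∀ v2, pvOminI S2 = some v2 → L ≤ v2 - c := by
    intro v2 hv
    have hSne : S2 ≠ [] := by
      intro h
      rw [h, pvOminI_nil] at hv
      simp at hv
    rw [pvOminI_eq _ hSne] at hv
    obtain ⟨pr, hprS, hpreq⟩ := List.mem_map.mp (pvMinNE_mem hSne)
    rw [← hS2] at hpreq
    have hprP := List.mem_of_mem_filter hprS
    have hprle : c ≤ pr.1 := by simpa using List.of_mem_filter hprS
    have hLF := hLle pr hprP
    have hd := hdist_abs pr.1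
    rw [abs_sub_comm, abs_of_nonneg (by omega)] at hd
    simp only [hF] at hLF
    have hv' := Option.some.inj hv
    omega
  -- generic upper bound: any x below every present candidate is below every F pr
  have hupper : ∀ pr ∈ P, ∀ (x : Int),
      x ≤ a2 →
      (∀ v1, pvOminI S1 = some v1 → x ≤ v1 + c) →
      (∀ v2, pvOminI S2 = some v2 → x ≤ v2 - c) →
      x ≤ F pr := by
    intro pr hpr x hxa2 hx1 hx2
    have h1 := hmxge pr hpr
    have h2 := hmnle pr hpr
    have hii : x ≤ pr.2 + (N - max pr.1 c + min pr.1 c) := by omega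
    have hi : x ≤ pr.2 + |c - pr.1| := by
      by_cases hc : pr.1 ≤ c
      · have hmem : pr ∈ P.filter (fun pr => decide (pr.1 ≤ c)) :=
          List.mem_filter.mpr ⟨hpr, by simpa using hc⟩
        have hSne : S1 ≠ [] := by
          rw [hS1]
          exact List.ne_nil_of_mem (List.mem_map_of_mem hmem)
        have hle : pvMinNE S1 ≤ pr.2 - pr.1 :=
          pvMinNE_le (List.mem_map_of_mem (f := fun pr => pr.2 - pr.1) hmem)
        have hx := hx1 _ (pvOminI_eq _ hSne)
        rw [abs_of_nonneg (by omega)]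
        omega
      · have hmem : pr ∈ P.filter (fun pr => decide (c ≤ pr.1)) :=
          List.mem_filter.mpr ⟨hpr, by simp; omega⟩
        have hSne : S2 ≠ [] := by
          rw [hS2]
          exact List.ne_nil_of_mem (List.mem_map_of_mem hmem)
        have hle : pvMinNE S2 ≤ pr.2 + pr.1 :=
          pvMinNE_le (List.mem_map_of_mem (f := fun pr => pr.2 + pr.1) hmem)
        have hx := hx2 _ (pvOminI_eq _ hSne)
        rw [abs_sub_comm, abs_of_nonneg (by omega)]
        omega
    have hcomb : x ≤ pr.2 + min (|c - pr.1|) (N - max pr.1 c + min pr.1 c) := by omega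
    simpa [hF, pvDist] using hcomb
  -- case analysis over which candidates are present
  rcases hv1 : pvOminI S1 with _ | v1 <;> rcases hv2 : pvOminI S2 with _ | v2 <;>
    simp only [Option.map_none, Option.map_some, pvMinO, Option.getD_some] <;>
    apply le_antisymm
  · rw [← hprLF]
    exact hupper prL hprLP _ le_rfl
      (fun v h => by rw [hv1] at h; simp at h)
      (fun v h => by rw [hv2] at h; simp at h)
  · exact hLa2
  · rw [← hprLF]
    refine hupper prL hprLP _ (min_le_right _ _)
      (fun v h => by rw [hv1] at h; simp at h)
      (fun v h => ?_)
    rw [hv2] at h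
    have := Option.some.inj h
    subst this
    omega
  · have := hq2ge v2 hv2
    omega
  · rw [← hprLF]
    refine hupper prL hprLP _ (min_le_right _ _)
      (fun v h => ?_)
      (fun v h => by rw [hv2] at h; simp at h)
    rw [hv1] at h
    have := Option.some.inj h
    subst this
    omega
  · have := hq1ge v1 hv1
    omega
  · rw [← hprLF]
    refine hupper prL hprLP _ (min_le_right _ _) (fun v h => ?_) (fun v h => ?_)
    · rw [hv1] at h
      have := Option.some.inj h
      subst this
      omega
    · rw [hv2] at h
      have := Option.some.inj h
      subst this
      omega
  · have h1 := hq1ge v1 hv1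
    have h2 := hq2ge v2 hv2
    omega

-- snoc forms of min/max over a nonempty list
theorem pvMinNE_snoc (l : List Int) (h : l ≠ []) (x : Int) :
    pvMinNE (l ++ [x]) = min (pvMinNE l) x := by
  cases l with
  | nil => exact absurd rfl h
  | cons y t => simp [pvMinNE, pvMinL, List.foldl_append]

theorem pvMaxNE_snoc (l : List Int) (h : l ≠ []) (x : Int) :
    pvMaxNE (l ++ [x]) = max (pvMaxNE l) x := by
  cases l with
  | nil => exact absurd rfl h
  | cons y t => simp [pvMaxNE, List.foldl_append]

theorem reverse_set (l : List (Option Int)) (n : Nat) (hn : n < l.length) (v : Option Int) :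
    (l.set n v).reverse = l.reverse.set (l.length - 1 - n) v := by
  apply List.ext_getElem
  · simp
  intro i h1 h2
  rw [List.length_reverse, List.length_set] at h1
  rw [List.getElem_reverse, List.getElem_set, List.getElem_set, List.getElem_reverse]
  simp only [List.length_set]
  by_cases hc : n = l.length - 1 - i
  · rw [if_pos hc, if_pos (by omega)]
  · rw [if_neg hc, if_neg (by omega)]

theorem getD_reverse (l : List (Option Int)) (n : Nat) (hn : n < l.length) :
    l.reverse.getD (l.length - 1 - n) none = l.getD n none := by
  rw [List.getD_eq_getElem _ _ (by rw [List.length_reverse]; omega),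
    List.getD_eq_getElem _ _ hn, List.getElem_reverse]
  congr 1
  omega

theorem pvPairsR_one (N : Int) (C : List Int) : pvPairsR N C 1 = [(1, 0)] := by
  simp [pvPairsR, pvRow, pvOff, pvCC_zero]

-- ===== B-side invariant and loop =====
def pvGood (N : Int) (C : List Int) (coords : List Int) (k : Nat) (s : BSt) : Prop :=
  svLeaves s.t1 = pvLspec coords (pvPairsR N C k) (fun pr => pr.2 - pr.1) ∧ svWf s.t1 ∧
  svLeaves s.t2 = (pvLspec coords (pvPairsR N C k) (fun pr => pr.2 + pr.1)).reverse ∧ svWf s.t2 ∧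
  s.mx = some (pvMaxNE ((pvPairsR N C k).map (fun pr => pr.1 - pr.2))) ∧
  s.mn = some (pvMinNE ((pvPairsR N C k).map (fun pr => pr.1 + pr.2))) ∧
  s.rels = (pvPairsR N C k).map (fun pr => pr.2) ∧
  s.prev = pvCC C k ∧
  s.off = pvOff N C k

theorem B_loop (N M : Int) (C : List Int) (hM : 1 ≤ M) (hMC : M ≤ (C.length : Int))
    (k : Nat) (hk : 1 ≤ k) (hkM : (k : Int) ≤ M) :
    pvGood N C
      (PySem.List.sorted (PySem.Set.ofList (1 :: PySem.List.slice C none (some M))) (fun x => x) false)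
      k
      ((PySem.List.pyRange 0 (k : Int) 1).foldl
        (pvStepB N C
          ((PySem.List.enumerate (PySem.List.sorted (PySem.Set.ofList (1 :: PySem.List.slice C none (some M))) (fun x => x) false) 0).foldl
            (fun d pr => d.insert pr.2 pr.1) PySem.Dict.empty)
          ((PySem.List.sorted (PySem.Set.ofList (1 :: PySem.List.slice C none (some M))) (fun x => x) false).length : Int))
        ⟨pvBuild (PySem.List.sorted (PySem.Set.ofList (1 :: PySem.List.slice C none (some M))) (fun x => x) false).length,
         pvBuild (PySem.List.sorted (PySem.Set.ofList (1 :: PySem.List.slice C none (some M))) (fun x => x) false).length,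
         none, none, [], 1, 0⟩) := by
  set pos := 1 :: PySem.List.slice C none (some M) with hpos
  set coords := PySem.List.sorted (PySem.Set.ofList pos) (fun x => x) false with hcoords
  set rankD := (PySem.List.enumerate coords 0).foldl (fun d pr => d.insert pr.2 pr.1)
    PySem.Dict.empty with hrankD
  have hsorted : coords.Pairwise (· < ·) := by
    rw [hcoords]
    exact PySem.List.sorted_ofList_pairwise_lt pos
  have hnd : coords.Nodup := List.Pairwise.imp (fun h => ne_of_lt h) hsorted
  have hmemc : ∀ x : Int, x ∈ coords ↔ x ∈ pos := by
    intro x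
    rw [hcoords, PySem.List.mem_sorted]
    exact PySem.Set.mem_ofList pos x
  have hslice : PySem.List.slice C none (some M) = C.take M.toNat := by
    rw [PySem.List.slice_to _ (by omega)]
  have hccmem : ∀ j : Nat, j ≤ M.toNat → pvCC C j ∈ pos := by
    intro j hj
    cases j with
    | zero =>
      rw [pvCC_zero, hpos]
      exact List.mem_cons_self ..
    | succ j =>
      have hjC : j < C.length := by omega
      have hcc : pvCC C (j+1) = C[j] := by
        simp [pvCC, List.getD_eq_getElem?_getD, List.getElem?_eq_getElem hjC]
      rw [hpos, hcc, hslice]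
      exact List.mem_cons_of_mem _ (List.mem_iff_getElem.mpr
        ⟨j, by rw [List.length_take]; omega, by rw [List.getElem_take]⟩)
  have hfind : ∀ x : Int, x ∈ pos → ∃ j : Nat, j < coords.length ∧ coords[j]? = some x ∧
      rankD.get? x = some (j : Int) := by
    intro x hx
    have hxc : x ∈ coords := (hmemc x).mpr hx
    obtain ⟨j, hj, hxe⟩ := List.mem_iff_getElem.mp hxc
    refine ⟨j, hj, by rw [List.getElem?_eq_getElem hj, hxe], ?_⟩
    rw [hrankD, ← hxe]
    exact rank_get coords hnd j hj
  revert hkM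
  induction k, hk using Nat.le_induction with
  | base =>
    intro _
    obtain ⟨j1, hj1, hj1e, hj1r⟩ := hfind 1 (by rw [hpos]; exact List.mem_cons_self ..)
    have hj1eq : coords[j1] = 1 := by
      rw [List.getElem?_eq_getElem hj1] at hj1e
      exact Option.some.inj hj1e
    have hlen1 : 1 ≤ coords.length := by omega
    have hlmax : max coords.length 1 = coords.length := by omega
    have hbl : svLeaves (pvBuild coords.length) = List.replicate coords.length none := by
      rw [svLeaves_build, hlmax]
    have hlenb : (svLeaves (pvBuild coords.length)).length = coords.length := by
      rw [hbl, List.length_replicate]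
    have hgetrep : ∀ m : Nat, (List.replicate coords.length (none : Option Int)).getD m none = none := by
      intro m
      rw [List.getD_eq_getElem?_getD, List.getElem?_replicate]
      split <;> rfl
    rw [show ((1:Nat):Int) = (0:Int) + 1 by norm_num, PySem.List.pyRange_one_singleton,
      List.foldl_cons, List.foldl_nil]
    have hc0 : pvIdxA C (0 : Int) = pvCC C 1 := by
      simpa using pvIdx_shift_eq_pvCC C 0
    have hch1 := svChmin_spec (pvBuild coords.length) (svWf_build _) (j1 : Int)
      (by positivity) (by rw [hlenb]; omega) (0 - 1)
    have hch2 := svChmin_spec (pvBuild coords.length) (svWf_build _) ((coords.length : Int) - 1 - (j1 : Int))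
      (by omega) (by rw [hlenb]; omega) (0 + 1)
    refine ⟨?_, ?_, ?_, ?_, ?_, ?_, ?_, ?_, ?_⟩
    · show svLeaves (pvChmin (pvBuild coords.length) ((rankD.get? 1).getD 0) (0 - 1)) = _
      rw [hj1r, Option.getD_some, hch1.1, pvPairsR_one,
        pvLspec_single coords hnd _ 1 0 j1 hj1 hj1eq, hbl,
        show (Int.toNat (j1:Int)) = j1 by omega, hgetrep]
      rfl
    · show svWf (pvChmin (pvBuild coords.length) ((rankD.get? 1).getD 0) (0 - 1))
      rw [hj1r, Option.getD_some]
      exact hch1.2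
    · show svLeaves (pvChmin (pvBuild coords.length) ((coords.length : Int) - 1 - (rankD.get? 1).getD 0) (0 + 1)) = _
      rw [hj1r, Option.getD_some, hch2.1, pvPairsR_one,
        pvLspec_single coords hnd _ 1 0 j1 hj1 hj1eq,
        reverse_set _ j1 (by rw [List.length_replicate]; exact hj1) _,
        List.reverse_replicate, List.length_replicate, hbl,
        show ((coords.length : Int) - 1 - (j1:Int)).toNat = coords.length - 1 - j1 by omega,
        hgetrep]
      rfl
    · show svWf (pvChmin (pvBuild coords.length) ((coords.length : Int) - 1 - (rankD.get? 1).getD 0) (0 + 1))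
      rw [hj1r, Option.getD_some]
      exact hch2.2
    · show some (1 - 0) = _
      rw [pvPairsR_one]
      rfl
    · show some (1 + 0) = _
      rw [pvPairsR_one]
      rfl
    · show [0] = _
      rw [pvPairsR_one]
      rfl
    · show pvIdxA C (0 : Int) = _
      rw [hc0]
    · show (0 : Int) + pvDist N 1 (pvIdxA C 0) = pvOff N C 1
      rw [hc0]
      show (0 : Int) + pvDist N 1 (pvCC C 1) = pvOff N C 0 + pvDist N (pvCC C 0) (pvCC C 1)
      rw [pvCC_zero]
      rfl
  | succ k hk ih =>
    intro hkM
    have hgood := ih (by push_cast at hkM ⊢; omega)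
    rw [show (((k+1:Nat)):Int) = (k:Int) + 1 by push_cast; ring,
      PySem.List.pyRange_one_succ_right (Int.natCast_nonneg k), List.foldl_append,
      List.foldl_cons, List.foldl_nil]
    set sk := (PySem.List.pyRange 0 (k : Int) 1).foldl
      (pvStepB N C rankD (coords.length : Int)) ⟨pvBuild coords.length, pvBuild coords.length,
        none, none, [], 1, 0⟩ with hsk
    obtain ⟨ht1, hw1, ht2, hw2, hmx, hmn, hrels, hprev, hoff⟩ := hgood
    set P := pvPairsR N C k with hP
    have hPne : P ≠ [] := by
      rw [hP, pvPairsR]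
      simp [List.range_eq_nil]
      omega
    have hposP : ∀ pr ∈ P, pr.1 ∈ coords := by
      intro pr hpr
      rw [hP, pvPairsR] at hpr
      obtain ⟨j, hj, hje⟩ := List.mem_map.mp hpr
      rw [List.mem_range] at hj
      rw [← hje]
      exact (hmemc _).mpr (hccmem j (by omega))
    set c' := pvCC C (k+1) with hc'
    have hc : pvIdxA C ((k:Nat):Int) = c' := pvIdx_shift_eq_pvCC C k
    obtain ⟨jc, hjc, hjce, hjcr⟩ := hfind c' (hccmem (k+1) (by omega))
    obtain ⟨jp, hjp, hjpe, hjpr⟩ := hfind (pvCC C k) (hccmem k (by omega))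
    have hjceq : coords[jc] = c' := by
      rw [List.getElem?_eq_getElem hjc] at hjce
      exact Option.some.inj hjce
    have hjpeq : coords[jp] = pvCC C k := by
      rw [List.getElem?_eq_getElem hjp] at hjpe
      exact Option.some.inj hjpe
    set d := pvDist N (pvCC C k) c' with hd
    set REL := pvMinNE (P.map (fun pr => pr.2 + pvDist N pr.1 c')) - d with hREL
    have hlsp1 : (svLeaves sk.t1).length = coords.length := by
      rw [ht1, pvLspec, List.length_map]
    have hlsp2 : (svLeaves sk.t2).length = coords.length := by
      rw [ht2, List.length_reverse, pvLspec, List.length_map]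
    -- the computed new relative cost equals REL
    have hq1 : pvQuery sk.t1 ((jc : Int) + 1)
        = pvOminI ((P.filter (fun pr => decide (pr.1 ≤ c'))).map (fun pr => pr.2 - pr.1)) := by
      rw [svQuery_eq sk.t1 hw1, ht1, show ((jc : Int) + 1).toNat = jc + 1 by omega,
        pvLspec, ← List.map_take, pvOmin_map_cell _ ((List.take_sublist _ _).nodup hnd)]
      congr 1
      apply congrArg
      apply List.filter_congr
      intro pr hpr
      apply decide_eq_decide.mpr
      rw [mem_take_sorted hsorted hjc, hjceq]
      exact ⟨fun h => h.2, fun h => ⟨hposP pr hpr, h⟩⟩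
    have hq2 : pvQuery sk.t2 ((coords.length : Int) - (jc : Int))
        = pvOminI ((P.filter (fun pr => decide (c' ≤ pr.1))).map (fun pr => pr.2 + pr.1)) := by
      rw [svQuery_eq sk.t2 hw2, ht2,
        show ((coords.length : Int) - (jc : Int)).toNat = coords.length - jc by omega,
        List.take_reverse, pvLspec, List.length_map,
        show coords.length - (coords.length - jc) = jc by omega,
        pvOmin_perm (List.reverse_perm _), ← List.map_drop,
        pvOmin_map_cell _ ((List.drop_sublist _ _).nodup hnd)]
      congr 1
      apply congrArg
      apply List.filter_congr
      intro pr hpr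
      apply decide_eq_decide.mpr
      rw [mem_drop_sorted hsorted hjc, hjceq]
      exact ⟨fun h => h.2, fun h => ⟨hposP pr hpr, h⟩⟩
    have hstep : pvStepB N C rankD (coords.length : Int) sk ((k:Nat):Int)
        = ⟨pvChmin sk.t1 (jp : Int) (REL - pvCC C k),
           pvChmin sk.t2 ((coords.length : Int) - 1 - (jp : Int)) (REL + pvCC C k),
           some (max (pvMaxNE (P.map (fun pr => pr.1 - pr.2))) (pvCC C k - REL)),
           some (min (pvMinNE (P.map (fun pr => pr.1 + pr.2))) (pvCC C k + REL)),
           sk.rels ++ [REL], c', sk.off + d⟩ := by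
      simp only [pvStepB, hc, hprev, hjcr, hjpr, Option.getD_some, hmx, hmn,
        if_neg (show ¬ ((k:Nat):Int) = 0 by omega)]
      rw [hq1, hq2, step_min N c' P hPne]
    rw [hstep]
    have hpairs := pairs_step N C k hk
    rw [← hP, ← hc', ← hd, ← hREL] at hpairs
    have hch1 := svChmin_spec sk.t1 hw1 (jp : Int) (by positivity)
      (by rw [hlsp1]; simpa using hjp) (REL - pvCC C k)
    have hch2 := svChmin_spec sk.t2 hw2 ((coords.length : Int) - 1 - (jp : Int))
      (by omega) (by rw [hlsp2]; omega) (REL + pvCC C k)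
    refine ⟨?_, hch1.2, ?_, hch2.2, ?_, ?_, ?_, rfl, ?_⟩
    · show svLeaves (pvChmin sk.t1 (jp : Int) (REL - pvCC C k)) = _
      rw [hch1.1, ht1, show ((jp:Int)).toNat = jp by omega, ← hpairs,
        pvLspec_snoc coords hnd P _ (pvCC C k) REL jp hjp hjpeq]
    · show svLeaves (pvChmin sk.t2 _ (REL + pvCC C k)) = _
      rw [hch2.1, ht2, ← hpairs,
        pvLspec_snoc coords hnd P _ (pvCC C k) REL jp hjp hjpeq,
        show (((coords.length : Int) - 1 - (jp : Int))).toNat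
          = (pvLspec coords P (fun pr => pr.2 + pr.1)).length - 1 - jp by
            rw [pvLspec, List.length_map]; omega,
        ← reverse_set _ jp (by rw [pvLspec, List.length_map]; exact hjp)]
      congr 3
      rw [getD_reverse _ jp (by rw [pvLspec, List.length_map]; exact hjp)]
    · show some _ = _
      rw [← hpairs, List.map_append,
        show List.map (fun pr : Int × Int => pr.1 - pr.2) [(pvCC C k, REL)]
          = [pvCC C k - REL] from rfl,
        pvMaxNE_snoc _ (fun h => hPne (List.map_eq_nil_iff.mp h)) _]
    · show some _ = _
      rw [← hpairs, List.map_append,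
        show List.map (fun pr : Int × Int => pr.1 + pr.2) [(pvCC C k, REL)]
          = [pvCC C k + REL] from rfl,
        pvMinNE_snoc _ (fun h => hPne (List.map_eq_nil_iff.mp h)) _]
    · show sk.rels ++ [REL] = _
      rw [hrels, ← hpairs, List.map_append]
      rfl
    · show sk.off + d = _
      rw [hoff, hd, hc']
      rfl

theorem B_eq_ref (N M : Int) (C : List Int) (hM : 1 ≤ M) (hMC : M ≤ (C.length : Int)) :
    getMinCodeEntryTime_alt N M C = pvMinNE (pvRow N C M.toNat) := by
  have hloop := B_loop N M C hM hMC M.toNat (by omega) (by omega)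
  rw [show ((M.toNat : Nat) : Int) = M by omega] at hloop
  obtain ⟨_, _, _, _, _, _, hrels, _, hoff⟩ := hloop
  simp only [getMinCodeEntryTime_alt]
  rw [hrels, hoff]
  set K := M.toNat with hK
  have hk : 1 ≤ K := by omega
  have hsnd : (pvPairsR N C K).map (fun pr => pr.2)
      = ((List.range K).map (fun j => (pvRow N C K).getD j 0)).map
          (fun v => v + (- pvOff N C K)) := by
    simp only [pvPairsR, List.map_map]
    apply List.map_congr_left
    intro j _
    simp only [Function.comp]
    ring
  have hne : (List.range K).map (fun j => (pvRow N C K).getD j 0) ≠ [] := by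
    simp [List.range_eq_nil]
    omega
  rw [hsnd, pvMinNE_shift _ _ hne]
  rw [show (List.range K).map (fun j => (pvRow N C K).getD j 0)
      = (List.range (pvRow N C K).length).map (fun j => (pvRow N C K).getD j 0) by
        rw [pvRow_length], map_getD_range]
  ring

-- ===== A side =====
theorem pvTbl_length (N : Int) (C : List Int) (K k : Nat) : (pvTbl N C K k).length = K + 1 := by
  simp [pvTbl]

theorem pvTbl_getElem (N : Int) (C : List Int) (K k i : Nat) (h : i < K + 1) :
    (pvTbl N C K k)[i]'(by rw [pvTbl_length]; omega)
    = if 1 ≤ i ∧ i ≤ k then (pvRow N C i).map some else List.replicate i none := by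
  simp [pvTbl]

-- element i of a partially-filled row (t cells set, rest still "inf")
theorem part_getElem (l : List Int) (t : Nat) (ht : t ≤ l.length) (i : Nat) (h : i < l.length) :
    ((l.take t).map some ++ List.replicate (l.length - t) none)[i]'(by simp; omega)
    = if i < t then some (l[i]'h) else none := by
  by_cases hi : i < t
  · rw [List.getElem_append_left (by simp; omega)]
    simp [List.getElem_take, hi]
  · rw [List.getElem_append_right (by simp; omega)]
    simp [hi]

theorem part_length (l : List Int) (t : Nat) (ht : t ≤ l.length) :
    (((l.take t).map some ++ List.replicate (l.length - t) none)).length = l.length := by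
  simp; omega

theorem set_partial (l : List Int) (m : Nat) (h : m < l.length) :
    (((l.take m).map some ++ List.replicate (l.length - m) none).set m (some (l.getD m 0)))
    = ((l.take (m+1)).map some ++ List.replicate (l.length - (m+1)) none) := by
  apply List.ext_getElem
  · rw [List.length_set, part_length _ _ (by omega), part_length _ _ (by omega)]
  intro i h1 h2
  rw [List.length_set, part_length _ _ (by omega)] at h1
  simp only [List.getElem_set]
  by_cases he : m = i
  · subst he
    rw [if_pos rfl, part_getElem _ _ (by omega) _ (by omega), if_pos (by omega),
      List.getD_eq_getElem _ _ h]
  · rw [if_neg he, part_getElem _ _ (by omega) _ (by omega),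
      part_getElem _ _ (by omega) _ (by omega)]
    by_cases hlt : i < m
    · rw [if_pos hlt, if_pos (by omega)]
    · rw [if_neg hlt, if_neg (by omega)]

theorem A_init (N : Int) (C : List Int) (K : Nat) :
    ((PySem.List.pyRange 0 ((K : Int) + 1) 1).map
      (fun i => (PySem.List.pyRange 0 i 1).map (fun _ => (none : Option Int))))
    = pvTbl N C K 0 := by
  rw [show ((K : Int) + 1) = ((K + 1 : Nat) : Int) by push_cast; ring, PySem.List.pyRange_one]
  simp only [pvTbl, List.map_map]
  apply List.map_congr_left
  intro n hn
  rw [List.mem_range] at hn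
  have hc : ¬ (1 ≤ n ∧ n ≤ 0) := by omega
  simp only [Function.comp, if_neg hc, List.map_const', PySem.List.length_pyRange_one]
  congr 1
  omega

theorem A_set (N : Int) (C : List Int) (K : Nat) (hK : 1 ≤ K) :
    pvSet2 (pvTbl N C K 0) 1 0 (some (getVal (pvIdxA (1 :: C) 0) (pvIdxA (1 :: C) 1) N))
    = pvTbl N C K 1 := by
  have h0 : pvIdxA (1 :: C) (0 : Int) = pvCC C 0 := by simpa using pvIdxA_eq_pvCC C 0
  have h1 : pvIdxA (1 :: C) (1 : Int) = pvCC C 1 := by simpa using pvIdxA_eq_pvCC C 1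
  rw [pvSet2, h0, h1, getVal_eq_pvDist, List.modify_eq_set]
  have hget : (pvTbl N C K 0)[(1 : Int).toNat]?.getD default = List.replicate 1 none := by
    rw [show (1 : Int).toNat = 1 from rfl,
      List.getElem?_eq_getElem (by rw [pvTbl_length]; omega), pvTbl_getElem N C K 0 1 (by omega)]
    simp
  rw [hget]
  apply List.ext_getElem
  · rw [List.length_set, pvTbl_length, pvTbl_length]
  intro i h1' h2'
  rw [List.length_set, pvTbl_length] at h1'
  simp only [List.getElem_set]
  by_cases he : (1 : Int).toNat = i
  · rw [if_pos he, pvTbl_getElem N C K 1 i (by omega)]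
    have : i = 1 := by omega
    subst this
    simp [pvRow, pvCC_zero]
  · rw [if_neg he, pvTbl_getElem N C K 0 i (by omega), pvTbl_getElem N C K 1 i (by omega)]
    have : ¬ (1 ≤ i ∧ i ≤ 0) := by omega
    have h2 : ¬ (1 ≤ i ∧ i ≤ 1) := by omega
    rw [if_neg this, if_neg h2]

theorem pvTbl_getElem? (N : Int) (C : List Int) (K k i : Nat) (h : i < K + 1) :
    (pvTbl N C K k)[i]?
    = some (if 1 ≤ i ∧ i ≤ k then (pvRow N C i).map some else List.replicate i none) := by
  rw [List.getElem?_eq_getElem (by rw [pvTbl_length]; omega), pvTbl_getElem N C K k i h]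

theorem pvGet2_some {t : List (List (Option Int))} {i j : Int} {r : List (Option Int)}
    (h1 : PySem.List.pyGet? t i = some r) {v : Option Int}
    (h2 : PySem.List.pyGet? r j = some v) : pvGet2 t i j = v := by
  rw [pvGet2, h1]
  show (match PySem.List.pyGet? r j with | none => none | some v => v) = v
  rw [h2]

theorem A_fold1 (N : Int) (C : List Int) (K k : Nat) (hk : 1 ≤ k) (hkK : k + 1 ≤ K) :
    ∀ (m : Nat), m ≤ k →
    (PySem.List.pyRange 0 (m : Int) 1).foldl (pvInner1A N (1 :: C) ((k : Int) + 1)) (pvTbl N C K k)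
    = (pvTbl N C K k).set (k+1)
        (((pvRow N C (k+1)).take m).map some ++ List.replicate (k+1-m) none) := by
  intro m
  induction m with
  | zero =>
    intro _
    rw [show ((0:Nat):Int) = 0 from rfl, PySem.List.pyRange_one_eq_nil (by norm_num)]
    simp only [List.foldl_nil, List.take_zero, List.map_nil, List.nil_append, Nat.sub_zero]
    apply List.ext_getElem
    · rw [List.length_set]
    intro i h1 h2
    rw [List.length_set, pvTbl_length] at h2
    rw [List.getElem_set]
    by_cases he : k + 1 = i
    · subst he
      rw [if_pos rfl, pvTbl_getElem N C K k (k+1) (by omega), if_neg (by omega)]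
    · rw [if_neg he]
  | succ m ih =>
    intro hm
    rw [show ((m+1:Nat):Int) = (m:Int) + 1 by push_cast; ring,
      PySem.List.pyRange_one_succ_right (Int.natCast_nonneg m), List.foldl_append,
      ih (by omega), List.foldl_cons, List.foldl_nil]
    rw [pvInner1A, show ((k:Int)+1) - 1 = ((k:Nat):Int) by ring]
    have hIdx1 : pvIdxA (1 :: C) ((k:Nat):Int) = pvCC C k := pvIdxA_eq_pvCC C k
    have hIdx2 : pvIdxA (1 :: C) ((k:Int)+1) = pvCC C (k+1) := by
      rw [show ((k:Int)+1) = (((k+1:Nat)):Int) by push_cast; ring]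
      exact pvIdxA_eq_pvCC C (k+1)
    have hrowlen : (pvRow N C k).length = k := pvRow_length N C k
    have hlen1 : (pvRow N C (k+1)).length = k + 1 := pvRow_length N C (k+1)
    have hget2 : pvGet2 ((pvTbl N C K k).set (k+1)
        (((pvRow N C (k+1)).take m).map some ++ List.replicate (k+1-m) none))
        ((k:Nat):Int) ((m:Nat):Int) = some ((pvRow N C k).getD m 0) := by
      have h1 : PySem.List.pyGet? ((pvTbl N C K k).set (k+1)
          (((pvRow N C (k+1)).take m).map some ++ List.replicate (k+1-m) none))
          ((k:Nat):Int) = some ((pvRow N C k).map some) := by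
        rw [PySem.List.pyGet?_natCast, List.getElem?_set_ne (by omega),
          pvTbl_getElem? N C K k k (by omega), if_pos ⟨hk, le_rfl⟩]
      have h2 : PySem.List.pyGet? ((pvRow N C k).map some) ((m:Nat):Int)
          = some (some ((pvRow N C k).getD m 0)) := by
        rw [PySem.List.pyGet?_natCast, List.getElem?_map,
          List.getElem?_eq_getElem (by omega : m < (pvRow N C k).length), Option.map_some,
          List.getD_eq_getElem _ _ (by omega)]
      exact pvGet2_some h1 h2
    rw [hget2, hIdx1, hIdx2, getVal_eq_pvDist, pvAddO, Option.map_some]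
    rw [pvSet2, show ((k:Int)+1) = (((k+1:Nat)):Int) by push_cast; ring,
      Int.toNat_natCast, Int.toNat_natCast, List.modify_eq_set]
    have hcur : ((pvTbl N C K k).set (k+1)
        (((pvRow N C (k+1)).take m).map some ++ List.replicate (k+1-m) none))[k+1]?.getD default
        = ((pvRow N C (k+1)).take m).map some ++ List.replicate (k+1-m) none := by
      rw [List.getElem?_set_self (by rw [pvTbl_length]; omega), Option.getD_some]
    rw [hcur, List.set_set]
    congr 1
    have hstab : (pvRow N C k).getD m 0 + pvDist N (pvCC C k) (pvCC C (k+1))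
        = (pvRow N C (k+1)).getD m 0 := (pvRow_getElem_stable N C k m hk (by omega)).symm
    calc ((((pvRow N C (k+1)).take m).map some ++ List.replicate (k+1-m) none).set m
            (some ((pvRow N C k).getD m 0 + pvDist N (pvCC C k) (pvCC C (k+1)))))
        = (((pvRow N C (k+1)).take m).map some ++
            List.replicate ((pvRow N C (k+1)).length - m) none).set m
            (some ((pvRow N C (k+1)).getD m 0)) := by rw [hlen1, hstab]
      _ = ((pvRow N C (k+1)).take (m+1)).map some ++
            List.replicate ((pvRow N C (k+1)).length - (m+1)) none :=
          set_partial _ m (by omega)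
      _ = _ := by rw [hlen1]

theorem A_fold2 (N : Int) (C : List Int) (K k : Nat) (hk : 1 ≤ k) (hkK : k + 1 ≤ K) :
    ∀ (m : Nat), m ≤ k →
    (PySem.List.pyRange 0 (m : Int) 1).foldl (pvInner2A N (1 :: C) ((k : Int) + 1))
      ((pvTbl N C K k).set (k+1) (((pvRow N C (k+1)).take k).map some ++ [none]))
    = (pvTbl N C K k).set (k+1) (((pvRow N C (k+1)).take k).map some ++
        [((List.range m).map (fun j => some ((pvRow N C k).getD j 0 +
            pvDist N (pvCC C j) (pvCC C (k+1))))).foldl pvMinO none]) := by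
  intro m
  induction m with
  | zero =>
    intro _
    rw [show ((0:Nat):Int) = 0 from rfl, PySem.List.pyRange_one_eq_nil (by norm_num)]
    simp
  | succ m ih =>
    intro hm
    rw [show ((m+1:Nat):Int) = (m:Int) + 1 by push_cast; ring,
      PySem.List.pyRange_one_succ_right (Int.natCast_nonneg m), List.foldl_append,
      ih (by omega), List.foldl_cons, List.foldl_nil]
    rw [pvInner2A, show ((k:Int)+1) - 1 = ((k:Nat):Int) by ring]
    have hIdxm : pvIdxA (1 :: C) ((m:Nat):Int) = pvCC C m := pvIdxA_eq_pvCC C m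
    have hIdx2 : pvIdxA (1 :: C) ((k:Int)+1) = pvCC C (k+1) := by
      rw [show ((k:Int)+1) = (((k+1:Nat)):Int) by push_cast; ring]
      exact pvIdxA_eq_pvCC C (k+1)
    have hrowlen : (pvRow N C k).length = k := pvRow_length N C k
    have hlen1 : (pvRow N C (k+1)).length = k + 1 := pvRow_length N C (k+1)
    have hpre : (((pvRow N C (k+1)).take k).map some).length = k := by simp [hlen1]
    have hcell : pvGet2 ((pvTbl N C K k).set (k+1) (((pvRow N C (k+1)).take k).map some ++
        [((List.range m).map (fun j => some ((pvRow N C k).getD j 0 +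
            pvDist N (pvCC C j) (pvCC C (k+1))))).foldl pvMinO none]))
        ((k:Int)+1) ((k:Nat):Int)
        = ((List.range m).map (fun j => some ((pvRow N C k).getD j 0 +
            pvDist N (pvCC C j) (pvCC C (k+1))))).foldl pvMinO none := by
      have h1 : PySem.List.pyGet? ((pvTbl N C K k).set (k+1) (((pvRow N C (k+1)).take k).map some ++
          [((List.range m).map (fun j => some ((pvRow N C k).getD j 0 +
            pvDist N (pvCC C j) (pvCC C (k+1))))).foldl pvMinO none]))
          ((k:Int)+1)
          = some (((pvRow N C (k+1)).take k).map some ++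
            [((List.range m).map (fun j => some ((pvRow N C k).getD j 0 +
              pvDist N (pvCC C j) (pvCC C (k+1))))).foldl pvMinO none]) := by
        rw [show ((k:Int)+1) = (((k+1:Nat)):Int) by push_cast; ring, PySem.List.pyGet?_natCast]
        exact List.getElem?_set_self (by rw [pvTbl_length]; omega)
      have h2 : PySem.List.pyGet? (((pvRow N C (k+1)).take k).map some ++
          [((List.range m).map (fun j => some ((pvRow N C k).getD j 0 +
            pvDist N (pvCC C j) (pvCC C (k+1))))).foldl pvMinO none]) ((k:Nat):Int)
          = some (((List.range m).map (fun j => some ((pvRow N C k).getD j 0 +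
            pvDist N (pvCC C j) (pvCC C (k+1))))).foldl pvMinO none) := by
        rw [PySem.List.pyGet?_natCast, List.getElem?_append_right (by omega), hpre,
          Nat.sub_self]
        rfl
      exact pvGet2_some h1 h2
    have hget2 : pvGet2 ((pvTbl N C K k).set (k+1) (((pvRow N C (k+1)).take k).map some ++
        [((List.range m).map (fun j => some ((pvRow N C k).getD j 0 +
            pvDist N (pvCC C j) (pvCC C (k+1))))).foldl pvMinO none]))
        ((k:Nat):Int) ((m:Nat):Int) = some ((pvRow N C k).getD m 0) := by
      have h1 : PySem.List.pyGet? ((pvTbl N C K k).set (k+1) (((pvRow N C (k+1)).take k).map some ++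
          [((List.range m).map (fun j => some ((pvRow N C k).getD j 0 +
            pvDist N (pvCC C j) (pvCC C (k+1))))).foldl pvMinO none]))
          ((k:Nat):Int) = some ((pvRow N C k).map some) := by
        rw [PySem.List.pyGet?_natCast, List.getElem?_set_ne (by omega),
          pvTbl_getElem? N C K k k (by omega), if_pos ⟨hk, le_rfl⟩]
      have h2 : PySem.List.pyGet? ((pvRow N C k).map some) ((m:Nat):Int)
          = some (some ((pvRow N C k).getD m 0)) := by
        rw [PySem.List.pyGet?_natCast, List.getElem?_map,
          List.getElem?_eq_getElem (by omega : m < (pvRow N C k).length), Option.map_some,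
          List.getD_eq_getElem _ _ (by omega)]
      exact pvGet2_some h1 h2
    rw [hcell, hget2, hIdxm, hIdx2, getVal_eq_pvDist, pvAddO, Option.map_some]
    rw [pvSet2, show ((k:Int)+1) = (((k+1:Nat)):Int) by push_cast; ring,
      Int.toNat_natCast, Int.toNat_natCast, List.modify_eq_set]
    have hcur : ((pvTbl N C K k).set (k+1) (((pvRow N C (k+1)).take k).map some ++
        [((List.range m).map (fun j => some ((pvRow N C k).getD j 0 +
            pvDist N (pvCC C j) (pvCC C (k+1))))).foldl pvMinO none]))[k+1]?.getD default
        = ((pvRow N C (k+1)).take k).map some ++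
            [((List.range m).map (fun j => some ((pvRow N C k).getD j 0 +
              pvDist N (pvCC C j) (pvCC C (k+1))))).foldl pvMinO none] := by
      rw [List.getElem?_set_self (by rw [pvTbl_length]; omega), Option.getD_some]
    rw [hcur, List.set_set]
    congr 1
    rw [List.set_append, if_neg (by omega), hpre, Nat.sub_self, List.set_cons_zero]
    congr 2
    rw [List.range_succ, List.map_append, List.foldl_append]
    rfl

theorem set_tbl (N : Int) (C : List Int) (K k : Nat) (_hkK : k + 1 ≤ K) :
    (pvTbl N C K k).set (k+1) ((pvRow N C (k+1)).map some) = pvTbl N C K (k+1) := by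
  apply List.ext_getElem
  · rw [List.length_set, pvTbl_length, pvTbl_length]
  intro i h1 h2
  rw [List.length_set, pvTbl_length] at h1
  rw [List.getElem_set, pvTbl_getElem N C K (k+1) i (by omega)]
  by_cases he : k + 1 = i
  · subst he
    rw [if_pos rfl, if_pos ⟨by omega, le_rfl⟩]
  · rw [if_neg he, pvTbl_getElem N C K k i (by omega)]
    by_cases hc : 1 ≤ i ∧ i ≤ k
    · rw [if_pos hc, if_pos ⟨hc.1, by omega⟩]
    · rw [if_neg hc, if_neg (by omega)]

theorem A_step (N : Int) (C : List Int) (K k : Nat) (hk : 1 ≤ k) (hkK : k + 1 ≤ K) :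
    pvStepA N (1 :: C) (pvTbl N C K k) ((k : Int) + 1) = pvTbl N C K (k + 1) := by
  rw [pvStepA, show ((k:Int)+1) - 1 = ((k:Nat):Int) by ring,
    A_fold1 N C K k hk hkK k le_rfl]
  rw [show List.replicate (k+1-k) (none : Option Int) = [none] by
    rw [show k+1-k = 1 by omega]; rfl]
  rw [A_fold2 N C K k hk hkK k le_rfl]
  have hne : (List.range k).map (fun j => (pvRow N C k).getD j 0 +
      pvDist N (pvCC C j) (pvCC C (k+1))) ≠ [] := by
    simp [List.range_eq_nil]; omega
  have hfoldeq : ((List.range k).map (fun j => some ((pvRow N C k).getD j 0 +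
      pvDist N (pvCC C j) (pvCC C (k+1))))).foldl pvMinO none
      = some (pvMinNE ((List.range k).map (fun j => (pvRow N C k).getD j 0 +
          pvDist N (pvCC C j) (pvCC C (k+1))))) := by
    rw [show (List.range k).map (fun j => some ((pvRow N C k).getD j 0 +
        pvDist N (pvCC C j) (pvCC C (k+1))))
        = ((List.range k).map (fun j => (pvRow N C k).getD j 0 +
            pvDist N (pvCC C j) (pvCC C (k+1)))).map some by rw [List.map_map]; rfl]
    exact foldl_pvMinO_none _ hne
  rw [hfoldeq]
  obtain ⟨k', rfl⟩ : ∃ k', k = k' + 1 := ⟨k - 1, by omega⟩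
  have hlast : (pvRow N C (k'+2)).getD (k'+1) 0
      = pvMinNE ((List.range (k'+1)).map
          (fun j => (pvRow N C (k'+1)).getD j 0 + pvDist N (pvCC C j) (pvCC C (k'+2)))) := by
    simp only [pvRow]
    rw [List.getD_append_right _ _ _ _ (by simp [pvRow_length])]
    simp [pvRow_length]
  rw [← hlast]
  have hlen1 : (pvRow N C (k'+2)).length = k' + 2 := pvRow_length N C (k'+2)
  have hrow : ((pvRow N C (k'+2)).take (k'+1)).map some ++ [some ((pvRow N C (k'+2)).getD (k'+1) 0)]
      = (pvRow N C (k'+2)).map some := by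
    rw [List.getD_eq_getElem _ _ (by omega)]
    rw [show ((pvRow N C (k'+2)).take (k'+1)).map some ++
        [some ((pvRow N C (k'+2))[k'+1]'(by omega))]
        = (((pvRow N C (k'+2)).take (k'+1)) ++ [(pvRow N C (k'+2))[k'+1]'(by omega)]).map some by
      rw [List.map_append]; rfl]
    rw [List.take_append_getElem, List.take_of_length_le (by omega)]
  rw [hrow]
  exact set_tbl N C K (k'+1) hkK

theorem A_loop (N : Int) (C : List Int) (K k : Nat) (hk : 1 ≤ k) (hkK : k ≤ K) :
    (PySem.List.pyRange 2 ((k : Int) + 1) 1).foldl (pvStepA N (1 :: C)) (pvTbl N C K 1)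
    = pvTbl N C K k := by
  induction k, hk using Nat.le_induction with
  | base =>
    rw [show ((1:Nat):Int) + 1 = 2 by norm_num, PySem.List.pyRange_one_eq_nil (by norm_num)]
    rfl
  | succ k hk ih =>
    rw [show (((k+1:Nat)):Int) + 1 = ((k:Int) + 1) + 1 by push_cast; ring,
      PySem.List.pyRange_one_succ_right (by omega), List.foldl_append,
      ih (by omega), List.foldl_cons, List.foldl_nil]
    exact A_step N C K k hk (by omega)

theorem A_eq_ref (N M : Int) (C : List Int) (h : 1 ≤ M) :
    getMinCodeEntryTime N M C = pvMinNE (pvRow N C M.toNat) := by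
  lift M to Nat using (by omega : (0:Int) ≤ M) with K
  have hK : 1 ≤ K := by omega
  simp only [getMinCodeEntryTime, Int.toNat_natCast]
  rw [A_init N C K, A_set N C K hK, A_loop N C K K hK le_rfl]
  rw [PySem.List.pyGet?_neg_one, List.getLast?_eq_getElem?, pvTbl_length,
    show K + 1 - 1 = K by omega, pvTbl_getElem? N C K K K (by omega), if_pos ⟨hK, le_rfl⟩]
  have hne : pvRow N C K ≠ [] := by
    intro h
    have := pvRow_length N C K
    rw [h] at this
    simp at this
    omega
  rw [Option.getD_some, foldl_pvMinO_none _ hne, Option.getD_some]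

-- ===== VERDICT (by name: the statement is the Claim_ definition above) =====
theorem getMinCodeEntryTime_spec : Claim_equal_getMinCodeEntryTime := by
  intro N M C _hdom hpre
  unfold Spec_getMinCodeEntryTime
  rw [A_eq_ref N M C hpre.1, B_eq_ref N M C hpre.1 hpre.2]
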